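-- pv_equiv track=rewrite | github.com/Tdrj2716/Reversi | adjust_pattern.py | translate_p
-- ===== SOURCE A (Python) =====
-- hw = 8
--
-- def translate_p(grid, arr):
--     res = []
--     for i in range(len(arr)):
--         tmp = 0
--         for j in reversed(range(len(arr[i]))):
--             tmp *= 3
--             tmp2 = grid[arr[i][j] // hw][arr[i][j] % hw]
--             if tmp2 == 0:
--                 tmp += 1
--             elif tmp2 == 1:
--                 tmp += 2
--         res.append(tmp)
--     return res
-- ===== SOURCE B (Python) =====
-- hw = 8
--
-- def translate_p(grid, arr):
--     digit = {0: 1, 1: 2}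
--     return [sum(digit.get(grid[v // hw][v % hw], 0) * 3 ** j
--                 for j, v in enumerate(p))
--             for p in arr]
-- ===== Notes on version B (the rewrite author's own statement) =====
-- stated objective: idiomatic
-- what changed: Replaces A's reversed Horner multiply-accumulate loop (tmp = tmp*3 + digit) with a direct positional power-sum: each cell contributes digit*3**j independently inside a comprehension, eliminating the accumulator state and the reversed index loop.
import Mathlib
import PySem

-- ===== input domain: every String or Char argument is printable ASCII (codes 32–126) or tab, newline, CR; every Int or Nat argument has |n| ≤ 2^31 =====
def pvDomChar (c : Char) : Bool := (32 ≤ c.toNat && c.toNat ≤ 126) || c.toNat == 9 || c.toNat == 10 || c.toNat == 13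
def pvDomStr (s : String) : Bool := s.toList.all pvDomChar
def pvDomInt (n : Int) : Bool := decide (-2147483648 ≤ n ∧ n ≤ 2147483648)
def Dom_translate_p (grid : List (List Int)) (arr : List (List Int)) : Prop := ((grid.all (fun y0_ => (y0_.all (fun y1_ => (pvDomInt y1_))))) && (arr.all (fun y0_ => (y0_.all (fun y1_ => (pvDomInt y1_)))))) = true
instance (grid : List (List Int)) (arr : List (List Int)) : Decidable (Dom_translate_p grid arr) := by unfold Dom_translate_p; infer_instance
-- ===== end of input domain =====

-- B replaces A's reversed Horner accumulator with an independent per-position power-sum (digit * 3^j); objective: idiomatic.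

-- ===== PORT A =====
-- literal port of A's nested loops; where Python would raise IndexError (invalid grid index,
-- excluded by Pre_) the match's none branch leaves tmp unchanged.
def translate_p (grid : List (List Int)) (arr : List (List Int)) : List Int :=
  arr.foldl (fun res row =>
    let tmp := ((PySem.List.pyRange 0 (row.length : Int) 1).reverse).foldl (fun tmp j =>
      let tmp := tmp * 3
      let v := PySem.List.pyGetD row j 0  -- j always in range
      match PySem.List.pyGet? grid (PySem.Int.floordiv v 8) with
      | none => tmp
      | some g =>
        match PySem.List.pyGet? g (PySem.Int.mod v 8) with
        | none => tmp
        | some tmp2 => if tmp2 = 0 then tmp + 1 else if tmp2 = 1 then tmp + 2 else tmp) (0 : Int)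
    res ++ [tmp]) []

-- ===== PORT B =====
-- digit.get(grid[v // 8][v % 8], 0); the none branches are where Python raises (excluded by Pre_)
def pvDigit (grid : List (List Int)) (v : Int) : Int :=
  match PySem.List.pyGet? grid (PySem.Int.floordiv v 8) with
  | none => 0
  | some g =>
    match PySem.List.pyGet? g (PySem.Int.mod v 8) with
    | none => 0
    | some c => if c = 0 then 1 else if c = 1 then 2 else 0

def translate_p_alt (grid : List (List Int)) (arr : List (List Int)) : List Int :=
  arr.map (fun p =>
    ((PySem.List.enumerate p 0).map (fun jv => pvDigit grid jv.2 * 3 ^ jv.1.toNat)).sum)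

-- ===== PRECONDITION & SPEC =====
-- Pre_ excludes exactly the inputs where A raises IndexError: some pattern cell v has
-- v // 8 out of range for grid, or v % 8 out of range for that row.
def Pre_translate_p (grid : List (List Int)) (arr : List (List Int)) : Prop :=
  ∀ row ∈ arr, ∀ v ∈ row,
    ((PySem.List.pyGet? grid (PySem.Int.floordiv v 8)).bind
      (fun g => PySem.List.pyGet? g (PySem.Int.mod v 8))).isSome = true
instance (grid : List (List Int)) (arr : List (List Int)) : Decidable (Pre_translate_p grid arr) := by unfold Pre_translate_p; infer_instance

def pvWitness_translate_p : List (List Int) × List (List Int) :=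
  ([[0, 1, 2, 0, 1, 0, 0, 0]], [[0, 1, 2], [7], [-8], []])

def Spec_translate_p (grid : List (List Int)) (arr : List (List Int)) (out : List Int) : Prop := out = translate_p_alt grid arr
instance (grid : List (List Int)) (arr : List (List Int)) (out : List Int) : Decidable (Spec_translate_p grid arr out) := by unfold Spec_translate_p; infer_instance

-- ===== CLAIM (what is proved, stated in full; the proofs are below) =====
def Claim_equal_translate_p : Prop := ∀ (grid : List (List Int)) (arr : List (List Int)), Dom_translate_p grid arr → Pre_translate_p grid arr → Spec_translate_p grid arr (translate_p grid arr)

-- ===== LEMMAS AND PROOFS =====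

-- A's inner step is tmp*3 plus the digit of the cell
theorem translate_p_step (grid : List (List Int)) (tmp v : Int) :
    (let tmp' := tmp * 3
     match PySem.List.pyGet? grid (PySem.Int.floordiv v 8) with
     | none => tmp'
     | some g =>
       match PySem.List.pyGet? g (PySem.Int.mod v 8) with
       | none => tmp'
       | some tmp2 => if tmp2 = 0 then tmp' + 1 else if tmp2 = 1 then tmp' + 2 else tmp')
    = tmp * 3 + pvDigit grid v := by
  unfold pvDigit
  cases h1 : PySem.List.pyGet? grid (PySem.Int.floordiv v 8) with
  | none => simp
  | some g =>
    dsimp only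
    cases h2 : PySem.List.pyGet? g (PySem.Int.mod v 8) with
    | none => simp
    | some c => dsimp only; split_ifs <;> ring

theorem enumerate_append_singleton (xs : List Int) (x : Int) (s : Int) :
    PySem.List.enumerate (xs ++ [x]) s
      = PySem.List.enumerate xs s ++ [(s + (xs.length : Int), x)] := by
  induction xs generalizing s with
  | nil => simp [PySem.List.enumerate_cons, PySem.List.enumerate_nil]
  | cons y ys ih =>
    simp [PySem.List.enumerate_cons, ih]
    ring_nf

-- A's reversed Horner loop over a row equals the power-sum over its enumeration
theorem horner_eq_powsum (grid : List (List Int)) (row : List Int) (a : Int) :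
    ((PySem.List.pyRange 0 (row.length : Int) 1).reverse).foldl
      (fun tmp j => tmp * 3 + pvDigit grid (PySem.List.pyGetD row j 0)) a
    = a * 3 ^ row.length
      + ((PySem.List.enumerate row 0).map (fun jv => pvDigit grid jv.2 * 3 ^ jv.1.toNat)).sum := by
  induction row using List.reverseRecOn generalizing a with
  | nil => simp [PySem.List.pyRange_one_eq_nil]
  | append_singleton xs x ih =>
    have hlen : (((xs ++ [x]).length : Int)) = (xs.length : Int) + 1 := by
      simp
    rw [hlen, PySem.List.pyRange_one_succ_right (by positivity)]
    rw [List.reverse_append, List.reverse_singleton, List.singleton_append, List.foldl_cons]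
    rw [PySem.List.foldl_congr_mem _ _
      (fun tmp j => tmp * 3 + pvDigit grid (PySem.List.pyGetD xs j 0)) _
      (by
        intro acc j hj
        rw [List.mem_reverse, PySem.List.mem_pyRange_one] at hj
        congr 1
        have hj' : j = ((j.toNat : Nat) : Int) := by omega
        rw [hj', PySem.List.pyGetD_natCast, PySem.List.pyGetD_natCast,
          List.getD_append _ _ _ _ (by omega)])]
    rw [ih]
    rw [enumerate_append_singleton]
    have hx : PySem.List.pyGetD (xs ++ [x]) (xs.length : Int) 0 = x := by
      rw [PySem.List.pyGetD_natCast]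
      simp
    rw [hx]
    simp [List.length_append, pow_succ]
    ring

-- ===== VERDICT (by name: the statement is the Claim_ definition above) =====
theorem translate_p_spec : Claim_equal_translate_p := by
  intro grid arr _ _
  unfold Spec_translate_p translate_p translate_p_alt
  rw [PySem.List.foldl_append_singleton_eq_map]
  apply List.map_congr_left
  intro row _
  have h := fun tmp j => translate_p_step grid tmp (PySem.List.pyGetD row j 0)
  calc _ = ((PySem.List.pyRange 0 (row.length : Int) 1).reverse).foldl
            (fun tmp j => tmp * 3 + pvDigit grid (PySem.List.pyGetD row j 0)) 0 := by
            apply List.foldl_ext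
            intro tmp j _
            exact h tmp j
    _ = _ := by rw [horner_eq_powsum]; simp
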